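-- pv_equiv track=rewrite | github.com/serhiisad/Numerical_Analysis | lab1/processor.py | iter_formula
-- ===== SOURCE A (Python) =====
-- def iter_formula(a):
--     n = len(a)
--     b = [0] * n
--     for k in range(0, n):
--         b[k] = a[k] ** 2
--         for j in range(1, n-k+1):
--             if k - j >= 0 and k + j < n:
--                 b[k] += 2 * ((-1) ** j) * a[k - j] * a[k + j]
--     return b
-- ===== SOURCE B (Python) =====
-- def iter_formula(a):
--     n = len(a)
--     ae = [a[i] for i in range(0, n, 2)]
--     ao = [a[i] for i in range(1, n, 2)]
--
--     def conv_at(z, k):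
--         # k-th coefficient of the self-convolution of z
--         return sum(z[i] * z[k - i] for i in range(max(0, k - len(z) + 1), min(k + 1, len(z))))
--
--     return [(-1) ** k * (conv_at(ae, k) - (conv_at(ao, k - 1) if k > 0 else 0))
--             for k in range(n)]
-- ===== Notes on version B (the rewrite author's own statement) =====
-- stated objective: alternative
-- what changed: B replaces A's per-index signed two-sided scan (sign flip, guard test and power on every inner step over a range of length n-k) by splitting a into its even- and odd-indexed subsequences and reading each output entry as (-1)^k times plain self-convolution coefficients of the two halves over exactly the valid window, so the guard, the per-term sign and the wasted iterations disappear.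
import Mathlib
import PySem

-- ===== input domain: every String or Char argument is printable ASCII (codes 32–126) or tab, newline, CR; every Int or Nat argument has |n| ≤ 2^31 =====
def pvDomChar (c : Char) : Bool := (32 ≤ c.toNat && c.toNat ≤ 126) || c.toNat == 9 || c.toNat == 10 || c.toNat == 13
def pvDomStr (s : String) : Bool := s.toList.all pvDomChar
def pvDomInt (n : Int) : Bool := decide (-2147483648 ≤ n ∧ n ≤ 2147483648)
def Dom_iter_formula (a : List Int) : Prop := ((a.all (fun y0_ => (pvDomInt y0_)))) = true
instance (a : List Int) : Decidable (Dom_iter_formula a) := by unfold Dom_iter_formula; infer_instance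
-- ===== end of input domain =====

-- B computes each entry as a signed self-convolution coefficient of the even/odd index halves of a,
-- instead of A's per-index two-sided signed scan over a guarded symmetric range.

-- ===== PORT A =====
def iter_formula (a : List Int) : List Int :=
  let n : Int := a.length
  let b : List Int := List.replicate a.length 0
  (PySem.List.pyRange 0 n 1).foldl (fun b k =>
    let v0 : Int := (PySem.List.pyGetD a k 0) ^ 2
    let v := (PySem.List.pyRange 1 (n - k + 1) 1).foldl (fun v j =>
      if 0 ≤ k - j ∧ k + j < n then
        v + 2 * (-1 : Int) ^ j.toNat * PySem.List.pyGetD a (k - j) 0 * PySem.List.pyGetD a (k + j) 0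
      else v) v0
    PySem.List.pySetD b k v) b

-- ===== PORT B =====
-- helper conv_at of Source B: the k-th self-convolution coefficient of z over the valid window
def convAt (z : List Int) (k : Int) : Int :=
  ((PySem.List.pyRange (max 0 (k - (z.length : Int) + 1)) (min (k + 1) (z.length : Int)) 1).map
    (fun i => PySem.List.pyGetD z i 0 * PySem.List.pyGetD z (k - i) 0)).sum

def iter_formula_alt (a : List Int) : List Int :=
  let n : Int := a.length
  let ae := (PySem.List.pyRange 0 n 2).map (fun i => PySem.List.pyGetD a i 0)
  let ao := (PySem.List.pyRange 1 n 2).map (fun i => PySem.List.pyGetD a i 0)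
  (PySem.List.pyRange 0 n 1).map (fun k =>
    (-1 : Int) ^ k.toNat * (convAt ae k - (if 0 < k then convAt ao (k - 1) else 0)))

-- ===== PRECONDITION & SPEC =====
def Spec_iter_formula (a : List Int) (out : List Int) : Prop := out = iter_formula_alt a
instance (a : List Int) (out : List Int) : Decidable (Spec_iter_formula a out) := by unfold Spec_iter_formula; infer_instance

-- ===== CLAIM (what is proved, stated in full; the proofs are below) =====
def Claim_equal_iter_formula : Prop := ∀ (a : List Int), Dom_iter_formula a → Spec_iter_formula a (iter_formula a)

-- ===== LEMMAS AND PROOFS =====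

def ggF (a : List Int) (i : ℕ) : Int := a.getD i 0

lemma sum_list_range (f : ℕ → ℤ) (n : ℕ) :
    ((List.range n).map f).sum = ∑ i ∈ Finset.range n, f i := rfl

lemma npow_congr {e e' : ℕ} (h : e % 2 = e' % 2) : ((-1:ℤ))^e = (-1)^e' :=
  neg_one_pow_congr (by constructor <;> (rw [Nat.even_iff, Nat.even_iff]; omega))

lemma foldl_set_range (f : ℕ → ℤ) (n : ℕ) : ∀ (m : ℕ), m ≤ n →
    (List.range m).foldl (fun b k => b.set k (f k)) (List.replicate n 0)
      = (List.range m).map f ++ List.replicate (n - m) 0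
  | 0, _ => by simp
  | (m+1), h => by
    rw [List.range_succ, List.foldl_append, foldl_set_range f n m (by omega)]
    have hrep : List.replicate (n - m) (0:ℤ) = 0 :: List.replicate (n - (m+1)) 0 := by
      rw [← List.replicate_succ]; congr 1; omega
    simp [hrep]

lemma sumF (g : ℕ → Int) : ∀ (m K : ℕ), m ≤ K →
    ∑ p ∈ Finset.Icc (K-m) (K+m), (-1:ℤ)^(K+p) * g p * g (2*K-p)
    = g K * g K + ∑ j ∈ Finset.range m, 2 * (-1:ℤ)^(j+1) * g (K-(j+1)) * g (K+(j+1))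
  | 0, K, _ => by
    simp only [Nat.sub_zero, Finset.Icc_self, Finset.sum_singleton,
      Finset.range_zero, Finset.sum_empty, add_zero]
    rw [show 2*K - K = K by omega, show K + K = 2*K by ring,
      (even_two_mul K).neg_one_pow]
    ring
  | (m+1), K, h => by
    rw [show K + (m+1) = (K + m) + 1 by omega,
      Finset.sum_Icc_succ_top (by omega)]
    rw [show Finset.Icc (K-(m+1)) (K+m) = insert (K-(m+1)) (Finset.Icc (K-m) (K+m)) by
      ext p; simp only [Finset.mem_Icc, Finset.mem_insert]; omega]
    rw [Finset.sum_insert (by simp only [Finset.mem_Icc]; omega)]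
    rw [sumF g m K (by omega), Finset.sum_range_succ]
    have e1 : (-1:ℤ)^(K + (K + m + 1)) = (-1)^(m+1) := npow_congr (by omega)
    have e2 : (-1:ℤ)^(K + (K - (m+1))) = (-1)^(m+1) := npow_congr (by omega)
    rw [e1, e2, show 2*K - (K+m+1) = K - (m+1) by omega, show 2*K - (K-(m+1)) = K + (m+1) by omega]
    simp only [show K + (m+1) = K + m + 1 by omega]
    ring

def entryF (a : List Int) (K : ℕ) : Int :=
  ∑ p ∈ Finset.Icc (K - min K (a.length - 1 - K)) (K + min K (a.length - 1 - K)),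
    (-1 : Int) ^ (K + p) * ggF a p * ggF a (2 * K - p)

lemma Aentry (a : List Int) (K : ℕ) (hK : K < a.length) :
    ((PySem.List.pyRange 1 ((a.length:ℤ) - (K:ℤ) + 1) 1).foldl (fun v j =>
        if 0 ≤ (K:ℤ) - j ∧ (K:ℤ) + j < (a.length:ℤ) then
          v + 2 * (-1:ℤ)^j.toNat * PySem.List.pyGetD a ((K:ℤ)-j) 0 * PySem.List.pyGetD a ((K:ℤ)+j) 0
        else v) ((PySem.List.pyGetD a (K:ℤ) 0)^2))
    = entryF a K := by
  set n := a.length with hn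
  set m := min K (n - 1 - K) with hm
  rw [PySem.List.foldl_congr_mem _ _ (fun v j =>
      v + (if 0 ≤ (K:ℤ) - j ∧ (K:ℤ) + j < (n:ℤ) then
        2 * (-1:ℤ)^j.toNat * PySem.List.pyGetD a ((K:ℤ)-j) 0 * PySem.List.pyGetD a ((K:ℤ)+j) 0
        else 0)) _
    (by intro acc x _
        beta_reduce
        by_cases hxc : 0 ≤ (K:ℤ) - x ∧ (K:ℤ) + x < (n:ℤ)
        · rw [if_pos hxc, if_pos hxc]
        · rw [if_neg hxc, if_neg hxc, add_zero])]
  rw [PySem.List.pyRange_one]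
  have hcnt : ((n:ℤ) - (K:ℤ) + 1 - 1).toNat = n - K := by omega
  rw [hcnt, List.foldl_map, PySem.List.foldl_add, sum_list_range]
  have hterm : ∀ i ∈ Finset.range (n - K),
      (if 0 ≤ (K:ℤ) - (1+(i:ℤ)) ∧ (K:ℤ) + (1+(i:ℤ)) < (n:ℤ) then
        2 * (-1:ℤ)^(1+(i:ℤ)).toNat * PySem.List.pyGetD a ((K:ℤ)-(1+(i:ℤ))) 0
          * PySem.List.pyGetD a ((K:ℤ)+(1+(i:ℤ))) 0
        else 0)
      = (if i + 1 ≤ m then 2 * (-1:ℤ)^(i+1) * ggF a (K-(i+1)) * ggF a (K+(i+1)) else 0) := by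
    intro i hi
    simp only [Finset.mem_range] at hi
    by_cases hc : i + 1 ≤ m
    · rw [if_pos (⟨by omega, by omega⟩ : 0 ≤ (K:ℤ) - (1+(i:ℤ)) ∧ (K:ℤ) + (1+(i:ℤ)) < (n:ℤ)),
        if_pos hc]
      have h1 : (K:ℤ) - (1 + (i:ℤ)) = ((K - (i+1) : ℕ) : ℤ) := by omega
      have h2 : (K:ℤ) + (1 + (i:ℤ)) = ((K + (i+1) : ℕ) : ℤ) := by omega
      have h3 : (1 + (i:ℤ)).toNat = i + 1 := by omega
      rw [h1, h2, h3, PySem.List.pyGetD_natCast, PySem.List.pyGetD_natCast]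
      rfl
    · rw [if_neg (by omega), if_neg hc]
  have hs : (∑ i ∈ Finset.range (n - K),
      (if 0 ≤ (K:ℤ) - (1+(i:ℤ)) ∧ (K:ℤ) + (1+(i:ℤ)) < (n:ℤ) then
        2 * (-1:ℤ)^(1+(i:ℤ)).toNat * PySem.List.pyGetD a ((K:ℤ)-(1+(i:ℤ))) 0
          * PySem.List.pyGetD a ((K:ℤ)+(1+(i:ℤ))) 0
        else 0))
      = ∑ i ∈ Finset.range (n - K),
        (if i + 1 ≤ m then 2 * (-1:ℤ)^(i+1) * ggF a (K-(i+1)) * ggF a (K+(i+1)) else 0) :=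
    Finset.sum_congr rfl hterm
  rw [hs, ← Finset.sum_filter]
  have hfil : (Finset.range (n - K)).filter (fun i => i + 1 ≤ m) = Finset.range m := by
    ext i; simp only [Finset.mem_filter, Finset.mem_range]; omega
  rw [hfil]
  rw [entryF, ← hn, ← hm, sumF (ggF a) m K (by omega)]
  have hv0 : PySem.List.pyGetD a (K:ℤ) 0 = ggF a K := by
    rw [PySem.List.pyGetD_natCast]; rfl
  rw [hv0]; ring

lemma half_char (a : List Int) (r : ℕ) :
    (PySem.List.pyRange (r:ℤ) (a.length:ℤ) 2).map (fun i => PySem.List.pyGetD a i 0)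
      = (List.range ((a.length + 1 - r)/2)).map (fun u => ggF a (2*u + r)) := by
  rw [PySem.List.pyRange_of_pos _ _ (by norm_num)]
  have hif : (if (r:ℤ) < (a.length:ℤ) then (((a.length:ℤ) - r + 2 - 1)/2).toNat else 0)
      = (a.length + 1 - r)/2 := by
    split_ifs with h <;> omega
  rw [hif, List.map_map]
  apply List.map_congr_left
  intro u hu
  simp only [List.mem_range] at hu
  simp only [Function.comp_apply]
  have hc : (r:ℤ) + 2*(u:ℤ) = ((2*u + r : ℕ) : ℤ) := by push_cast; ring
  rw [hc, PySem.List.pyGetD_natCast]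
  rfl

lemma convAt_char (h : ℕ → Int) (L K : ℕ) :
    convAt ((List.range L).map h) ((K:ℕ):ℤ)
      = ∑ u ∈ Finset.Icc (K + 1 - L) (min K (L - 1)), h u * h (K - u) := by
  unfold convAt
  rw [List.length_map, List.length_range]
  have hlo : max 0 ((K:ℤ) - (L:ℤ) + 1) = ((K + 1 - L : ℕ) : ℤ) := by omega
  rw [hlo, PySem.List.pyRange_one, List.map_map, sum_list_range]
  set A := K + 1 - L with hA
  set B := min K (L - 1) with hB
  by_cases hL : L = 0
  · subst hL
    have h1 : (min ((K:ℤ)+1) (((0:ℕ)):ℤ) - ((A:ℕ):ℤ)).toNat = 0 := by omega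
    have h2 : Finset.Icc A B = ∅ := by
      rw [Finset.Icc_eq_empty_iff]; omega
    rw [h1, h2]
    simp
  · have hcnt : (min ((K:ℤ)+1) (L:ℤ) - ((A:ℕ):ℤ)).toNat = B + 1 - A := by omega
    rw [hcnt]
    refine Finset.sum_nbij' (fun i => A + i) (fun u => u - A) ?_ ?_ ?_ ?_ ?_
    · intro i hi; simp only [Finset.mem_range] at hi; simp only [Finset.mem_Icc]; omega
    · intro u hu; simp only [Finset.mem_Icc] at hu; simp only [Finset.mem_range]; omega
    · intro i hi; simp only [Finset.mem_range] at hi; dsimp only; omega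
    · intro u hu; simp only [Finset.mem_Icc] at hu; dsimp only; omega
    · intro i hi
      simp only [Finset.mem_range] at hi
      simp only [Function.comp_apply]
      have h1 : ((A:ℕ):ℤ) + (i:ℤ) = ((A + i : ℕ) : ℤ) := by push_cast; ring
      have h2 : (K:ℤ) - ((A + i : ℕ) : ℤ) = ((K - (A+i) : ℕ) : ℤ) := by omega
      rw [h1, PySem.List.pyGetD_natCast, h2, PySem.List.pyGetD_natCast,
        List.getD_eq_getElem?_getD, List.getD_eq_getElem?_getD]
      have hx : A + i < L := by omega
      have hy : K - (A + i) < L := by omega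
      simp [hx, hy]

lemma Bentry (a : List Int) (K : ℕ) (hK : K < a.length) :
    (-1:ℤ)^K * ((∑ u ∈ Finset.Icc (K + 1 - (a.length+1)/2) (min K ((a.length+1)/2 - 1)),
        ggF a (2*u) * ggF a (2*(K-u)))
      - (if 0 < K then
          ∑ u ∈ Finset.Icc ((K-1) + 1 - a.length/2) (min (K-1) (a.length/2 - 1)),
            ggF a (2*u+1) * ggF a (2*((K-1)-u)+1)
         else 0))
    = entryF a K := by
  set n := a.length with hn
  set m := min K (n - 1 - K) with hm
  set le := (n+1)/2 with hle
  set lo := n/2 with hlo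
  rw [entryF, ← hn, ← hm]
  by_cases hK0 : 0 < K
  · rw [← Finset.sum_filter_add_sum_filter_not (Finset.Icc (K-m) (K+m)) (fun p => p % 2 = 0)]
    have heven : (Finset.Icc (K-m) (K+m)).filter (fun p => p % 2 = 0)
        = (Finset.Icc (K + 1 - le) (min K (le - 1))).image (fun u => 2*u) := by
      ext p
      simp only [Finset.mem_filter, Finset.mem_Icc, Finset.mem_image]
      constructor
      · rintro ⟨⟨h1, h2⟩, h3⟩; exact ⟨p/2, by omega, by omega⟩
      · rintro ⟨u, hu, rfl⟩; omega
    have hodd : (Finset.Icc (K-m) (K+m)).filter (fun p => ¬ p % 2 = 0)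
        = (Finset.Icc ((K-1) + 1 - lo) (min (K-1) (lo - 1))).image (fun u => 2*u+1) := by
      ext p
      simp only [Finset.mem_filter, Finset.mem_Icc, Finset.mem_image]
      constructor
      · rintro ⟨⟨h1, h2⟩, h3⟩; exact ⟨p/2, by omega, by omega⟩
      · rintro ⟨u, hu, rfl⟩; omega
    rw [heven, hodd,
      Finset.sum_image (by intro x _ y _ hxy; dsimp only at hxy; omega),
      Finset.sum_image (by intro x _ y _ hxy; dsimp only at hxy; omega)]
    have he : ∀ u ∈ Finset.Icc (K + 1 - le) (min K (le - 1)),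
        (-1:ℤ)^(K + 2*u) * ggF a (2*u) * ggF a (2*K - 2*u)
          = (-1:ℤ)^K * (ggF a (2*u) * ggF a (2*(K-u))) := by
      intro u hu
      simp only [Finset.mem_Icc] at hu
      rw [npow_congr (e := K + 2*u) (e' := K) (by omega),
        show 2*K - 2*u = 2*(K-u) by omega]
      ring
    have ho : ∀ u ∈ Finset.Icc ((K-1) + 1 - lo) (min (K-1) (lo - 1)),
        (-1:ℤ)^(K + (2*u+1)) * ggF a (2*u+1) * ggF a (2*K - (2*u+1))
          = -((-1:ℤ)^K * (ggF a (2*u+1) * ggF a (2*((K-1)-u)+1))) := by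
      intro u hu
      simp only [Finset.mem_Icc] at hu
      rw [npow_congr (e := K + (2*u+1)) (e' := K+1) (by omega),
        show 2*K - (2*u+1) = 2*((K-1)-u)+1 by omega, pow_succ]
      ring
    rw [Finset.sum_congr rfl he, Finset.sum_congr rfl ho, if_pos hK0]
    rw [Finset.sum_neg_distrib, ← Finset.mul_sum, ← Finset.mul_sum]
    ring
  · have hK' : K = 0 := by omega
    subst hK'
    rw [if_neg hK0]
    have h1 : Finset.Icc (0 + 1 - le) (min 0 (le - 1)) = Finset.Icc 0 0 := by
      have : 0 + 1 - le = 0 := by omega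
      rw [this, Nat.min_eq_left (by omega)]
    have h2 : (0:ℕ) - m = 0 := by omega
    have h3 : (0:ℕ) + m = 0 := by omega
    rw [h1, h2, h3]
    simp [ggF]

def AvN (a : List Int) (K : ℕ) : Int :=
  (PySem.List.pyRange 1 ((a.length:ℤ) - (K:ℤ) + 1) 1).foldl (fun v j =>
      if 0 ≤ (K:ℤ) - j ∧ (K:ℤ) + j < (a.length:ℤ) then
        v + 2 * (-1:ℤ)^j.toNat * PySem.List.pyGetD a ((K:ℤ)-j) 0 * PySem.List.pyGetD a ((K:ℤ)+j) 0
      else v) ((PySem.List.pyGetD a (K:ℤ) 0)^2)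


theorem portA_eq_map' (a : List Int) :
    iter_formula a = (List.range a.length).map (AvN a) := by
  have key : ∀ (G : ℤ → ℤ),
      (PySem.List.pyRange 0 (a.length:ℤ) 1).foldl
        (fun b k => PySem.List.pySetD b k (G k)) (List.replicate a.length 0)
      = (List.range a.length).map (fun K : ℕ => G (K:ℤ)) := by
    intro G
    simp only [PySem.List.pyRange_one, sub_zero, Int.toNat_natCast, List.foldl_map, zero_add,
      PySem.List.pySetD_natCast]
    rw [foldl_set_range _ a.length a.length le_rfl]
    simp
  unfold iter_formula
  dsimp only
  exact (key _).trans (by rfl)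

theorem portA_eq_map (a : List Int) :
    iter_formula a = (List.range a.length).map (entryF a) := by
  rw [portA_eq_map']
  exact List.map_congr_left (fun K hK => Aentry a K (List.mem_range.mp hK))

lemma ae_char (a : List Int) :
    (PySem.List.pyRange 0 (a.length:ℤ) 2).map (fun i => PySem.List.pyGetD a i 0)
      = (List.range ((a.length + 1)/2)).map (fun u => ggF a (2*u)) := by
  have h := half_char a 0
  simpa using h

lemma ao_char (a : List Int) :
    (PySem.List.pyRange 1 (a.length:ℤ) 2).map (fun i => PySem.List.pyGetD a i 0)
      = (List.range (a.length/2)).map (fun u => ggF a (2*u + 1)) := by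
  have h := half_char a 1
  simpa using h

theorem portB_eq_map (a : List Int) :
    iter_formula_alt a = (List.range a.length).map (entryF a) := by
  unfold iter_formula_alt
  dsimp only
  rw [ae_char, ao_char]
  rw [PySem.List.pyRange_one 0 (a.length:ℤ), sub_zero, Int.toNat_natCast, List.map_map]
  apply List.map_congr_left
  intro K hK
  rw [List.mem_range] at hK
  simp only [Function.comp_apply, zero_add, Int.toNat_natCast]
  rw [convAt_char (fun u => ggF a (2*u)) ((a.length + 1)/2) K]
  by_cases hK0 : 0 < K
  · rw [if_pos (by exact_mod_cast hK0 : (0:ℤ) < (K:ℤ))]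
    rw [show (K:ℤ) - 1 = ((K - 1 : ℕ):ℤ) by omega]
    rw [convAt_char (fun u => ggF a (2*u + 1)) (a.length/2) (K - 1)]
    rw [← Bentry a K hK, if_pos hK0]
  · rw [if_neg (by exact_mod_cast hK0), ← Bentry a K hK, if_neg hK0]

-- ===== VERDICT (by name: the statement is the Claim_ definition above) =====
theorem iter_formula_spec : Claim_equal_iter_formula := by
  intro a _
  unfold Spec_iter_formula
  rw [portA_eq_map, portB_eq_map]
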